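-- pv_equiv track=rewrite | github.com/Lingzhi-UTokyo/Block_ED | Clusters_Square.py | count_holes
-- ===== SOURCE A (Python) =====
-- def count_holes(cluster):
--     cluster_set = set(cluster)
--     hole_count = 0
--     for (x, y) in cluster:
--         square = [
--             (x, y),
--             (x + 1, y),
--             (x, y + 1),
--             (x + 1, y + 1)
--         ]
--         if all(pt in cluster_set for pt in square):
--             hole_count += 1
--     return hole_count
-- ===== SOURCE B (Python) =====
-- def count_holes(cluster):
--     s = set(cluster)
--     left = {(a - 1, b) for (a, b) in s}
--     down = {(a, b - 1) for (a, b) in s}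
--     diag = {(a - 1, b - 1) for (a, b) in s}
--     valid = s & left & down & diag
--     return sum(1 for p in cluster if p in valid)
-- ===== Notes on version B (the rewrite author's own statement) =====
-- stated objective: alternative
-- what changed: B replaces A's per-point four-membership test by building the valid-corner set once as the intersection of the cluster set with its three shifted copies, then counting list elements that lie in it.
import Mathlib
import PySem

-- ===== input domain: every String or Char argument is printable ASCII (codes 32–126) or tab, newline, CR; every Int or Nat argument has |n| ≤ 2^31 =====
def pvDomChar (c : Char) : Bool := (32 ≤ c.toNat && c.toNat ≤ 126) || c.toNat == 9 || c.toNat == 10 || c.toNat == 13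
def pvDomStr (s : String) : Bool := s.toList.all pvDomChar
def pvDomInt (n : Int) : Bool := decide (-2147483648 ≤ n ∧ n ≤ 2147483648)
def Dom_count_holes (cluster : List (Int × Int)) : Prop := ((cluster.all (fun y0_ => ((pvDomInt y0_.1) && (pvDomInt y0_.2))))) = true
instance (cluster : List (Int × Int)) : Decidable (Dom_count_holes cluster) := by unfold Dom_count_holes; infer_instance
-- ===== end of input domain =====

-- B builds the set of valid bottom-left corners once by intersecting shifted copies of the
-- cluster set, instead of A's four-membership test per point (objective: alternative).

-- ===== PORT A =====
def count_holes (cluster : List (Int × Int)) : Int :=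
  let cluster_set := PySem.Set.ofList cluster
  cluster.foldl (fun hole_count p =>
    let square := [(p.1, p.2), (p.1 + 1, p.2), (p.1, p.2 + 1), (p.1 + 1, p.2 + 1)]
    if square.all (fun pt => PySem.Set.contains cluster_set pt) then hole_count + 1
    else hole_count) 0

-- ===== PORT B =====
def count_holes_alt (cluster : List (Int × Int)) : Int :=
  let s := PySem.Set.ofList cluster
  let left := PySem.Set.ofList (s.map (fun q => (q.1 - 1, q.2)))
  let down := PySem.Set.ofList (s.map (fun q => (q.1, q.2 - 1)))
  let diag := PySem.Set.ofList (s.map (fun q => (q.1 - 1, q.2 - 1)))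
  let valid := PySem.Set.inter (PySem.Set.inter (PySem.Set.inter s left) down) diag
  (cluster.map (fun p => if PySem.Set.contains valid p then (1 : Int) else 0)).sum

-- ===== PRECONDITION & SPEC =====
def Spec_count_holes (cluster : List (Int × Int)) (out : Int) : Prop := out = count_holes_alt cluster
instance (cluster : List (Int × Int)) (out : Int) : Decidable (Spec_count_holes cluster out) := by unfold Spec_count_holes; infer_instance

-- ===== CLAIM (what is proved, stated in full; the proofs are below) =====
def Claim_equal_count_holes : Prop := ∀ (cluster : List (Int × Int)), Dom_count_holes cluster → Spec_count_holes cluster (count_holes cluster)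

-- ===== LEMMAS AND PROOFS =====

-- membership in a shifted copy of s is membership of the shifted-back point in s
theorem mem_shift_map (s : List (Int × Int)) (dx dy : Int) (p : Int × Int) :
    p ∈ s.map (fun q => (q.1 - dx, q.2 - dy)) ↔ (p.1 + dx, p.2 + dy) ∈ s := by
  constructor
  · rintro h
    rcases List.mem_map.mp h with ⟨q, hq, rfl⟩
    simpa using hq
  · intro h
    exact List.mem_map.mpr ⟨(p.1 + dx, p.2 + dy), h, by simp⟩

-- the two per-point conditions coincide
theorem cond_eq (cluster : List (Int × Int)) (p : Int × Int) :
    PySem.Set.contains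
      (PySem.Set.inter (PySem.Set.inter (PySem.Set.inter (PySem.Set.ofList cluster)
        (PySem.Set.ofList ((PySem.Set.ofList cluster).map (fun q => (q.1 - 1, q.2)))))
        (PySem.Set.ofList ((PySem.Set.ofList cluster).map (fun q => (q.1, q.2 - 1)))))
        (PySem.Set.ofList ((PySem.Set.ofList cluster).map (fun q => (q.1 - 1, q.2 - 1))))) p
    = [(p.1, p.2), (p.1 + 1, p.2), (p.1, p.2 + 1), (p.1 + 1, p.2 + 1)].all
        (fun pt => PySem.Set.contains (PySem.Set.ofList cluster) pt) := by
  rw [Bool.eq_iff_iff]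
  have h1 := mem_shift_map (PySem.Set.ofList cluster) 1 0 p
  have h2 := mem_shift_map (PySem.Set.ofList cluster) 0 1 p
  have h3 := mem_shift_map (PySem.Set.ofList cluster) 1 1 p
  simp only [sub_zero] at h1 h2
  simp only [List.all_cons, List.all_nil, Bool.and_true, Bool.and_eq_true,
    PySem.Set.contains_iff, PySem.Set.mem_inter, PySem.Set.mem_ofList, h1, h2, h3,
    add_zero, Prod.mk.eta]
  tauto

theorem fold_eq_sum (cluster : List (Int × Int)) (cond : Int × Int → Bool) (acc : Int) :
    cluster.foldl (fun n p => if cond p then n + 1 else n) acc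
      = acc + (cluster.map (fun p => if cond p then (1 : Int) else 0)).sum := by
  induction cluster generalizing acc with
  | nil => simp
  | cons x xs ih =>
      simp only [List.foldl_cons, List.map_cons, List.sum_cons, ih]
      split <;> ring

-- ===== VERDICT (by name: the statement is the Claim_ definition above) =====
theorem count_holes_spec : Claim_equal_count_holes := by
  intro cluster _
  unfold Spec_count_holes count_holes count_holes_alt
  simp only []
  rw [fold_eq_sum, zero_add]
  congr 1
  apply List.map_congr_left
  intro p _
  rw [cond_eq]
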